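-- pv_equiv track=rewrite | github.com/trgnam04/MHH_Assignment_HK232 | Assignment-CO2011-CSE233-2212153-ProgramFolder/FFD.py | cut_materials
-- ===== SOURCE A (Python) =====
-- def cut_materials(lengths, quantities, sorted_patterns):
--     cut_list = []
--     remaining_quantities = quantities[:]
--
--     for pattern, stock_length, _ in sorted_patterns:
--         can_cut = True
--
--         # Lặp qua từng phần cắt trong pattern
--         while can_cut:
--             for i in range(len(lengths)):
--                 if remaining_quantities[i] < pattern[i]:
--                     can_cut = False
--                     break
--
--             if can_cut:
--                 for i in range(len(lengths)):
--                     remaining_quantities[i] -= pattern[i]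
--
--                 cut_list.append((pattern, stock_length, stock_length - sum(pattern[i] * lengths[i] for i in range(len(lengths)))))
--
--     return cut_list, remaining_quantities
-- ===== SOURCE B (Python) =====
-- def cut_materials(lengths, quantities, sorted_patterns):
--     cut_list = []
--     remaining_quantities = quantities[:]
--     n = len(lengths)
--     for pattern, stock_length, _ in sorted_patterns:
--         # batch: how many times can this pattern be applied? (min over binding constraints)
--         reps = None
--         for i in range(n):
--             p = pattern[i]
--             if p > 0:
--                 c = max(0, remaining_quantities[i] // p)
--             elif remaining_quantities[i] < p:
--                 c = 0
--             else:
--                 continue  # non-positive demand already satisfied: no constraint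
--             if reps is None or c < reps:
--                 reps = c
--             if reps == 0:
--                 break  # cannot cut this pattern at all
--         if reps is None:
--             reps = 0
--         if reps > 0:
--             waste = stock_length - sum(pattern[i] * lengths[i] for i in range(n))
--             cut_list.extend([(pattern, stock_length, waste)] * reps)
--             for i in range(n):
--                 remaining_quantities[i] -= pattern[i] * reps
--     return cut_list, remaining_quantities
-- ===== Notes on version B (the rewrite author's own statement) =====
-- stated objective: alternative
-- what changed: B replaces A's one-cut-at-a-time while-loop (which re-scans the pattern and decrements quantities once per produced cut) by a closed-form repetition count per pattern (min over floor(quantity/positive demand), stopping at the first zero) followed by one batch append and one batch decrement.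
import Mathlib
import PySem

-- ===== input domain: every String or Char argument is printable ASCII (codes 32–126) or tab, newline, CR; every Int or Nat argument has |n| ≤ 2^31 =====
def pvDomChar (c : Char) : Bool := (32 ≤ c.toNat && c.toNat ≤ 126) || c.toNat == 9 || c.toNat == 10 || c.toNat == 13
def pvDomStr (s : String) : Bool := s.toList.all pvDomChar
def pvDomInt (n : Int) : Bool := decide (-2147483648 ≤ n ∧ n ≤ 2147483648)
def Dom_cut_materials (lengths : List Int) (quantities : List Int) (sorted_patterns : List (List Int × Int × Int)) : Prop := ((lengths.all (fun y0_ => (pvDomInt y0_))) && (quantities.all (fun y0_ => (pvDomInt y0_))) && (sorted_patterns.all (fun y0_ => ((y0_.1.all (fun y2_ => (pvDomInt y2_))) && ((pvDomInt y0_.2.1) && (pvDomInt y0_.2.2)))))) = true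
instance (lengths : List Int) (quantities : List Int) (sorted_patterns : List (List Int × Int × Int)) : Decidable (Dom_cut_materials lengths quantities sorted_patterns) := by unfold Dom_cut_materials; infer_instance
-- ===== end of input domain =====

-- B replaces A's one-cut-at-a-time while-loop by a per-pattern closed-form repetition count
-- (min over floor(quantity/positive demand)) with one batch append/decrement; equivalence is
-- proved on Pre_ (patterns long enough, with a positive demand entry, so A terminates).

-- ===== PORT A =====
-- A's inner check 'for i in range(len(lengths)): if rem[i] < pattern[i]: can_cut = False; break'
def pvChkA (n : Int) (pattern rem : List Int) : Bool :=
  (PySem.List.pyRange 0 n 1).all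
    (fun i => !(PySem.List.pyGetD rem i 0 < PySem.List.pyGetD pattern i 0))

-- 'for i in range(len(lengths)): remaining_quantities[i] -= pattern[i]'
def pvSubA (n : Int) (pattern rem : List Int) : List Int :=
  (PySem.List.pyRange 0 n 1).foldl
    (fun q i => PySem.List.pySetD q i (PySem.List.pyGetD q i 0 - PySem.List.pyGetD pattern i 0)) rem

-- 'stock_length - sum(pattern[i] * lengths[i] for i in range(len(lengths)))'
def pvWaste (n : Int) (lengths pattern : List Int) (sl : Int) : Int :=
  sl - ((PySem.List.pyRange 0 n 1).map
    (fun i => PySem.List.pyGetD pattern i 0 * PySem.List.pyGetD lengths i 0)).sum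

-- A's 'while can_cut' loop; the fuel argument is only a totality guard (inside Pre_ the
-- fuel supplied below is never exhausted, proved in the lemmas).
def pvLoopA (n : Int) (lengths pattern : List Int) (sl : Int) :
    Nat → List (List Int × Int × Int) → List Int → (List (List Int × Int × Int)) × List Int
  | 0, acc, rem => (acc, rem)
  | fuel+1, acc, rem =>
    if pvChkA n pattern rem then
      pvLoopA n lengths pattern sl fuel
        (acc ++ [(pattern, sl, pvWaste n lengths pattern sl)]) (pvSubA n pattern rem)
    else (acc, rem)

def cut_materials (lengths : List Int) (quantities : List Int) (sorted_patterns : List (List Int × Int × Int)) : (List (List Int × Int × Int)) × List Int :=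
  sorted_patterns.foldl
    (fun st pat =>
      pvLoopA (lengths.length : Int) lengths pat.1 pat.2.1
        (st.2.foldl (fun a x => a + x.natAbs) 0 + 1) st.1 st.2)
    ([], quantities)

-- ===== PORT B =====
-- one step of B's constraint scan: 'if reps is None or c < reps: reps = c'
def pvRepStep (pattern rem : List Int) (reps : Option Int) (i : Int) : Option Int :=
  let p := PySem.List.pyGetD pattern i 0
  let co : Option Int :=
    if 0 < p then some (max 0 (PySem.Int.floordiv (PySem.List.pyGetD rem i 0) p))
    else if PySem.List.pyGetD rem i 0 < p then some 0
    else none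
  match co with
  | none => reps
  | some c =>
    match reps with
    | none => some c
    | some r => if c < r then some c else reps

-- B's repetition count: the constraint scan with 'if reps == 0: break'
def pvRepsB (pattern rem : List Int) : List Int → Option Int → Option Int
  | [], reps => reps
  | i :: rest, reps =>
    let reps' := pvRepStep pattern rem reps i
    if reps' = some 0 then reps' else pvRepsB pattern rem rest reps'

-- 'for i in range(n): remaining_quantities[i] -= pattern[i] * reps'
def pvSubB (n : Int) (pattern : List Int) (r : Int) (rem : List Int) : List Int :=
  (PySem.List.pyRange 0 n 1).foldl
    (fun q i => PySem.List.pySetD q i (PySem.List.pyGetD q i 0 - PySem.List.pyGetD pattern i 0 * r)) rem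

def cut_materials_alt (lengths : List Int) (quantities : List Int) (sorted_patterns : List (List Int × Int × Int)) : (List (List Int × Int × Int)) × List Int :=
  sorted_patterns.foldl
    (fun st pat =>
      let r := (pvRepsB pat.1 st.2 (PySem.List.pyRange 0 (lengths.length : Int) 1) none).getD 0
      if 0 < r then
        (st.1 ++ List.replicate r.toNat
            (pat.1, pat.2.1, pvWaste (lengths.length : Int) lengths pat.1 pat.2.1),
         pvSubB (lengths.length : Int) pat.1 r st.2)
      else st)
    ([], quantities)

-- ===== PRECONDITION & SPEC =====
-- pvFF: the pattern's first stock check fails at an in-range index i (A breaks there,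
-- leaving the quantities untouched, so no IndexError and no cut for this pattern)
def pvFF (lengths quantities : List Int) (pat : List Int × Int × Int) : Prop :=
  ∃ i < lengths.length, i < quantities.length ∧ i < pat.1.length ∧
    quantities.getD i 0 < pat.1.getD i 0 ∧ ∀ j < i, pat.1.getD j 0 ≤ quantities.getD j 0

-- Pre_ admits (first disjunct) lists long enough with a positive demand in every pattern
-- (A terminates normally) and (second disjunct) inputs where every pattern fails its first
-- stock check in range (A returns the quantities unchanged). Excluded: inputs where A's
-- indexing raises IndexError (so does B's), where A's while-loop never terminates (a pattern
-- with no positive demand among the first len(lengths) entries whose check passes), and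
-- mixed corners where A happens to return early — on excluded inputs where A returns,
-- B returns the same value (cites in claim.json).
def Pre_cut_materials (lengths : List Int) (quantities : List Int) (sorted_patterns : List (List Int × Int × Int)) : Prop :=
  (lengths.length ≤ quantities.length ∧
    ∀ pat ∈ sorted_patterns,
      lengths.length ≤ pat.1.length ∧ ∃ x ∈ pat.1.take lengths.length, 0 < x) ∨
  (∀ pat ∈ sorted_patterns, pvFF lengths quantities pat)
instance (lengths : List Int) (quantities : List Int) (sorted_patterns : List (List Int × Int × Int)) : Decidable (Pre_cut_materials lengths quantities sorted_patterns) := by unfold Pre_cut_materials pvFF; infer_instance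

def pvWitness_cut_materials : List Int × List Int × (List (List Int × Int × Int)) :=
  ([2, 3], [7, 5], [([1, 1], 10, 0), ([2, 0], 9, 1)])

def Spec_cut_materials (lengths : List Int) (quantities : List Int) (sorted_patterns : List (List Int × Int × Int)) (out : (List (List Int × Int × Int)) × List Int) : Prop := out = cut_materials_alt lengths quantities sorted_patterns
instance (lengths : List Int) (quantities : List Int) (sorted_patterns : List (List Int × Int × Int)) (out : (List (List Int × Int × Int)) × List Int) : Decidable (Spec_cut_materials lengths quantities sorted_patterns out) := by unfold Spec_cut_materials; infer_instance

-- ===== CLAIM (what is proved, stated in full; the proofs are below) =====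
def Claim_equal_cut_materials : Prop := ∀ (lengths : List Int) (quantities : List Int) (sorted_patterns : List (List Int × Int × Int)), Dom_cut_materials lengths quantities sorted_patterns → Pre_cut_materials lengths quantities sorted_patterns → Spec_cut_materials lengths quantities sorted_patterns (cut_materials lengths quantities sorted_patterns)

-- ===== LEMMAS AND PROOFS =====

-- clean (Nat-indexed) forms of the per-index data
def pvG (pattern rem : List Int) (k : Nat) : Option Int :=
  if 0 < pattern.getD k 0 then some (max 0 ((rem.getD k 0).fdiv (pattern.getD k 0)))
  else if rem.getD k 0 < pattern.getD k 0 then some 0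
  else none

def pvMerge (o co : Option Int) : Option Int :=
  match co with
  | none => o
  | some c => match o with
    | none => some c
    | some r => if c < r then some c else o

def pvRepsC (pattern rem : List Int) (n : Nat) : Option Int :=
  (List.range n).foldl (fun o k => pvMerge o (pvG pattern rem k)) none

def pvSetF (F : Nat → Int → Int) (n : Nat) (q : List Int) : List Int :=
  (List.range n).foldl (fun q k => q.set k (F k (q.getD k 0))) q

theorem pvSetF_length (F : Nat → Int → Int) (n : Nat) (q : List Int) :
    (pvSetF F n q).length = q.length := by
  induction n generalizing q with
  | zero => simp [pvSetF]
  | succ m ih =>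
    simp only [pvSetF, List.range_succ, List.foldl_append, List.foldl_cons, List.foldl_nil]
    rw [show ((List.range m).foldl (fun q k => q.set k (F k (q.getD k 0))) q) = pvSetF F m q from rfl]
    simp [ih]

theorem pvSetF_getElem? (F : Nat → Int → Int) (n : Nat) (q : List Int) (hn : n ≤ q.length) (j : Nat) :
    (pvSetF F n q)[j]? = if j < n then some (F j (q.getD j 0)) else q[j]? := by
  induction n generalizing j with
  | zero => simp [pvSetF]
  | succ m ih =>
    have hm : m ≤ q.length := Nat.le_of_succ_le hn
    simp only [pvSetF, List.range_succ, List.foldl_append, List.foldl_cons, List.foldl_nil]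
    rw [show ((List.range m).foldl (fun q k => q.set k (F k (q.getD k 0))) q) = pvSetF F m q from rfl]
    have hgd : (pvSetF F m q).getD m 0 = q.getD m 0 := by
      have h1 : (pvSetF F m q)[m]? = q[m]? := by rw [ih hm]; simp
      simp [List.getD, h1]
    rw [List.getElem?_set]
    rw [hgd, pvSetF_length, ih hm]
    by_cases h1 : j = m
    · subst h1
      have hlt : j < q.length := by omega
      simp [hlt, List.getD]
    · have hmj : ¬ (m = j) := fun h => h1 h.symm
      by_cases h2 : j < m
      · simp [hmj, h2, Nat.lt_succ_of_lt h2]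
      · have h3 : ¬ j < m + 1 := by omega
        simp [hmj, h2, h3]

-- bridges from the ports' pyRange/pyGetD/pySetD forms to the clean forms
theorem pvChkA_eq (n : Nat) (pattern rem : List Int) :
    pvChkA (n : Int) pattern rem = true ↔ ∀ k < n, pattern.getD k 0 ≤ rem.getD k 0 := by
  simp [pvChkA, PySem.List.pyRange_zero_nat, List.all_map, List.all_eq_true, List.mem_range]

theorem pvSubA_eq (n : Nat) (pattern rem : List Int) :
    pvSubA (n : Int) pattern rem = pvSetF (fun k x => x - pattern.getD k 0) n rem := by
  simp [pvSubA, pvSetF, PySem.List.pyRange_zero_nat, List.foldl_map]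

theorem pvSubB_eq (n : Nat) (pattern : List Int) (r : Int) (rem : List Int) :
    pvSubB (n : Int) pattern r rem = pvSetF (fun k x => x - pattern.getD k 0 * r) n rem := by
  simp [pvSubB, pvSetF, PySem.List.pyRange_zero_nat, List.foldl_map]

theorem pvRepStep_zero (pattern rem : List Int) (l : List Int) :
    l.foldl (pvRepStep pattern rem) (some 0) = some 0 := by
  induction l with
  | nil => rfl
  | cons i rest ih =>
    rw [List.foldl_cons]
    have h : pvRepStep pattern rem (some 0) i = some 0 := by
      simp only [pvRepStep]
      split_ifs with h1 h2
      · have hmax := le_max_left 0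
          (PySem.Int.floordiv (PySem.List.pyGetD rem i 0) (PySem.List.pyGetD pattern i 0))
        simp only []
        rw [if_neg (by omega)]
      · simp only []
        rw [if_neg (by omega : ¬ (0:Int) < 0)]
      · rfl
    rw [h, ih]

theorem pvRepsB_foldl (pattern rem : List Int) (l : List Int) (o : Option Int) :
    pvRepsB pattern rem l o = l.foldl (pvRepStep pattern rem) o := by
  induction l generalizing o with
  | nil => rfl
  | cons i rest ih =>
    rw [List.foldl_cons]
    show (if pvRepStep pattern rem o i = some 0 then pvRepStep pattern rem o i
          else pvRepsB pattern rem rest (pvRepStep pattern rem o i)) = _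
    by_cases h : pvRepStep pattern rem o i = some 0
    · rw [if_pos h, h, pvRepStep_zero]
    · rw [if_neg h, ih]

theorem pvRepsB_eq (n : Nat) (pattern rem : List Int) :
    pvRepsB pattern rem (PySem.List.pyRange 0 (n : Int) 1) none = pvRepsC pattern rem n := by
  rw [pvRepsB_foldl]
  simp only [PySem.List.pyRange_zero_nat, List.foldl_map, pvRepStep,
    PySem.List.pyGetD_natCast]
  unfold pvRepsC
  congr 1

-- integer-division facts (floor division with a positive divisor)
theorem pvFdiv_pos_eq (a p : Int) (h : 0 < p) : a.fdiv p = a / p := by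
  rw [Int.fdiv_eq_ediv, if_pos (Or.inl (by omega))]; ring

theorem pvFdiv_sub (a p : Int) (h : 0 < p) : (a - p).fdiv p = a.fdiv p - 1 := by
  rw [pvFdiv_pos_eq _ _ h, pvFdiv_pos_eq _ _ h]
  have := Int.add_mul_ediv_right a (-1) (show p ≠ 0 by omega)
  rw [show a - p = a + (-1)*p by ring, this]; ring

theorem pvFdiv_one_le (a p : Int) (h : 0 < p) : 1 ≤ a.fdiv p ↔ p ≤ a := by
  rw [pvFdiv_pos_eq _ _ h, Int.le_ediv_iff_mul_le h, one_mul]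

theorem pvRepsC_succ (pattern rem : List Int) (m : Nat) :
    pvRepsC pattern rem (m + 1) = pvMerge (pvRepsC pattern rem m) (pvG pattern rem m) := by
  simp [pvRepsC, List.range_succ]

theorem pvMerge_some (o : Option Int) (c : Int) :
    ∃ w, pvMerge o (some c) = some w ∧ w ≤ c ∧ (∀ r, o = some r → w ≤ r) ∧
      (w = c ∨ o = some w) := by
  cases o with
  | none => exact ⟨c, rfl, le_refl c, by simp, Or.inl rfl⟩
  | some r =>
    by_cases h : c < r
    · exact ⟨c, by simp [pvMerge, h], le_refl c, by intro r' hr'; cases hr'; omega, Or.inl rfl⟩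
    · exact ⟨r, by simp [pvMerge, h], by omega, by intro r' hr'; cases hr'; omega, Or.inr rfl⟩

-- characterization of the fold computing the min
theorem pvRepsC_none (pattern rem : List Int) (n : Nat) :
    pvRepsC pattern rem n = none ↔ ∀ k < n, pvG pattern rem k = none := by
  induction n with
  | zero => simp [pvRepsC]
  | succ m ih =>
    rw [pvRepsC_succ]
    cases hg : pvG pattern rem m with
    | none =>
      simp only [pvMerge, ih]
      constructor
      · intro h k hk
        rcases Nat.lt_succ_iff_lt_or_eq.mp hk with h' | h'
        · exact h k h'
        · subst h'; exact hg
      · intro h k hk; exact h k (Nat.lt_succ_of_lt hk)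
    | some c =>
      obtain ⟨w, hw, -⟩ := pvMerge_some (pvRepsC pattern rem m) c
      rw [hw]
      constructor
      · intro h; cases h
      · intro h; exact absurd (h m (Nat.lt_succ_self m)) (by simp [hg])

theorem pvRepsC_some (pattern rem : List Int) (n : Nat) (v : Int)
    (h : pvRepsC pattern rem n = some v) :
    (∃ k < n, pvG pattern rem k = some v) ∧
      ∀ k < n, ∀ c, pvG pattern rem k = some c → v ≤ c := by
  induction n generalizing v with
  | zero => cases h
  | succ m ih =>
    rw [pvRepsC_succ] at h
    cases hg : pvG pattern rem m with
    | none =>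
      rw [hg] at h
      simp only [pvMerge] at h
      obtain ⟨⟨k, hk, hgk⟩, hmin⟩ := ih v h
      refine ⟨⟨k, Nat.lt_succ_of_lt hk, hgk⟩, ?_⟩
      intro k' hk' c hc
      rcases Nat.lt_succ_iff_lt_or_eq.mp hk' with h' | h'
      · exact hmin k' h' c hc
      · subst h'; rw [hg] at hc; cases hc
    | some c =>
      rw [hg] at h
      obtain ⟨w, hw, hwc, hwr, hwo⟩ := pvMerge_some (pvRepsC pattern rem m) c
      rw [hw] at h
      cases h
      have hmin : ∀ k < m, ∀ c', pvG pattern rem k = some c' → v ≤ c' := by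
        intro k hk c' hc'
        cases ho : pvRepsC pattern rem m with
        | none =>
          exact absurd hc' (by simp [(pvRepsC_none pattern rem m).mp ho k hk])
        | some r =>
          exact le_trans (hwr r ho) ((ih r ho).2 k hk c' hc')
      have hex : ∃ k < m + 1, pvG pattern rem k = some v := by
        rcases hwo with h' | h'
        · exact ⟨m, Nat.lt_succ_self m, by rw [hg, h']⟩
        · obtain ⟨⟨k, hk, hgk⟩, -⟩ := ih v h'
          exact ⟨k, Nat.lt_succ_of_lt hk, hgk⟩
      refine ⟨hex, ?_⟩
      intro k hk c' hc'
      rcases Nat.lt_succ_iff_lt_or_eq.mp hk with h' | h'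
      · exact hmin k h' c' hc'
      · subst h'; rw [hg] at hc'; cases hc'; exact hwc

theorem pvG_ge_one_iff (pattern rem : List Int) (k : Nat) :
    (∀ c, pvG pattern rem k = some c → 1 ≤ c) ↔ pattern.getD k 0 ≤ rem.getD k 0 := by
  unfold pvG
  split_ifs with h1 h2
  · constructor
    · intro h
      have hm := h _ rfl
      have hf : 1 ≤ (rem.getD k 0).fdiv (pattern.getD k 0) := by
        rcases le_max_iff.mp hm with h' | h'
        · omega
        · exact h'
      exact (pvFdiv_one_le _ _ h1).mp hf
    · intro h c hc
      cases hc
      have hf : 1 ≤ (rem.getD k 0).fdiv (pattern.getD k 0) := (pvFdiv_one_le _ _ h1).mpr h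
      omega
  · constructor
    · intro h; exact absurd (h 0 rfl) (by norm_num)
    · intro h; omega
  · constructor
    · intro _; omega
    · intro _ c hc; cases hc

theorem pvG_nonneg (pattern rem : List Int) (k : Nat) (c : Int)
    (h : pvG pattern rem k = some c) : 0 ≤ c := by
  unfold pvG at h
  split_ifs at h with h1 h2 <;> cases h <;> omega

theorem pvSetF_getD (F : Nat → Int → Int) (n : Nat) (q : List Int) (hn : n ≤ q.length)
    (k : Nat) (hk : k < n) :
    (pvSetF F n q).getD k 0 = F k (q.getD k 0) := by
  have := pvSetF_getElem? F n q hn k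
  rw [if_pos hk] at this
  simp [List.getD, this]

theorem pvMerge_map (o co : Option Int) :
    pvMerge (o.map (fun v => v - 1)) (co.map (fun v => v - 1))
      = (pvMerge o co).map (fun v => v - 1) := by
  cases co with
  | none => simp [pvMerge]
  | some c =>
    cases o with
    | none => simp [pvMerge]
    | some r =>
      simp only [Option.map_some, pvMerge]
      by_cases h : c < r
      · rw [if_pos h, if_pos (by omega : c - 1 < r - 1)]; rfl
      · rw [if_neg h, if_neg (by omega : ¬ c - 1 < r - 1)]; rfl

theorem pvFoldMerge_map (g g' : Nat → Option Int) (n : Nat)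
    (h : ∀ k < n, g' k = (g k).map (fun v => v - 1)) (o : Option Int) :
    (List.range n).foldl (fun o k => pvMerge o (g' k)) (o.map (fun v => v - 1))
      = ((List.range n).foldl (fun o k => pvMerge o (g k)) o).map (fun v => v - 1) := by
  induction n generalizing o with
  | zero => simp
  | succ m ih =>
    simp only [List.range_succ, List.foldl_append, List.foldl_cons, List.foldl_nil]
    rw [ih (fun k hk => h k (Nat.lt_succ_of_lt hk)) o, h m (Nat.lt_succ_self m),
      pvMerge_map]

-- decrementing the remaining quantities by one application decrements every constraint
theorem pvG_sub (pattern rem : List Int) (n : Nat) (hn : n ≤ rem.length)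
    (hchk : ∀ k < n, pattern.getD k 0 ≤ rem.getD k 0) (k : Nat) (hk : k < n) :
    pvG pattern (pvSetF (fun k x => x - pattern.getD k 0) n rem) k
      = (pvG pattern rem k).map (fun v => v - 1) := by
  have hq : (pvSetF (fun k x => x - pattern.getD k 0) n rem).getD k 0
      = rem.getD k 0 - pattern.getD k 0 := pvSetF_getD _ n rem hn k hk
  have hc := hchk k hk
  unfold pvG
  rw [hq]
  by_cases h1 : 0 < pattern.getD k 0
  · rw [if_pos h1, if_pos h1]
    have hf1 : 1 ≤ (rem.getD k 0).fdiv (pattern.getD k 0) := (pvFdiv_one_le _ _ h1).mpr hc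
    rw [pvFdiv_sub _ _ h1]
    simp only [Option.map_some]
    congr 1
    omega
  · rw [if_neg h1, if_neg h1]
    have h2 : ¬ rem.getD k 0 < pattern.getD k 0 := by omega
    have h3 : ¬ rem.getD k 0 - pattern.getD k 0 < pattern.getD k 0 := by omega
    rw [if_neg h2, if_neg h3]
    rfl

theorem pvRepsC_sub (pattern rem : List Int) (n : Nat) (hn : n ≤ rem.length)
    (hchk : ∀ k < n, pattern.getD k 0 ≤ rem.getD k 0) :
    pvRepsC pattern (pvSetF (fun k x => x - pattern.getD k 0) n rem) n
      = (pvRepsC pattern rem n).map (fun v => v - 1) := by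
  unfold pvRepsC
  have := pvFoldMerge_map (pvG pattern rem)
    (pvG pattern (pvSetF (fun k x => x - pattern.getD k 0) n rem)) n
    (fun k hk => pvG_sub pattern rem n hn hchk k hk) none
  simpa using this

def pvBatch (pattern : List Int) (r : Int) (n : Nat) (q : List Int) : List Int :=
  pvSetF (fun k x => x - pattern.getD k 0 * r) n q

theorem pvBatch_zero (pattern : List Int) (n : Nat) (q : List Int) (hn : n ≤ q.length) :
    pvBatch pattern 0 n q = q := by
  apply List.ext_getElem?
  intro j
  rw [pvBatch, pvSetF_getElem? _ n q hn j]
  by_cases hj : j < n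
  · rw [if_pos hj]
    have hjl : j < q.length := by omega
    rw [List.getD_eq_getElem q 0 hjl, List.getElem?_eq_getElem hjl]
    ring_nf
  · rw [if_neg hj]

theorem pvBatch_succ (pattern : List Int) (v : Nat) (n : Nat) (q : List Int) (hn : n ≤ q.length) :
    pvBatch pattern ((v : Int) + 1) n q
      = pvBatch pattern (v : Int) n (pvSetF (fun k x => x - pattern.getD k 0) n q) := by
  have hlen : n ≤ (pvSetF (fun k x => x - pattern.getD k 0) n q).length := by
    rw [pvSetF_length]; exact hn
  apply List.ext_getElem?
  intro j
  rw [pvBatch, pvBatch, pvSetF_getElem? _ n q hn j, pvSetF_getElem? _ n _ hlen j]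
  by_cases hj : j < n
  · rw [if_pos hj, if_pos hj, pvSetF_getD _ n q hn j hj]
    congr 1
    ring
  · rw [if_neg hj, if_neg hj, pvSetF_getElem? _ n q hn j, if_neg hj]

-- the main loop lemma: with enough fuel, A's while-loop produces exactly v copies
theorem pvLoopA_eq (lengths pattern : List Int) (sl : Int) (v : Nat) :
    ∀ (fuel : Nat), v < fuel → ∀ (acc : List (List Int × Int × Int)) (q : List Int),
      lengths.length ≤ q.length →
      pvRepsC pattern q lengths.length = some (v : Int) →
      pvLoopA (lengths.length : Int) lengths pattern sl fuel acc q
        = (acc ++ List.replicate v (pattern, sl, pvWaste (lengths.length : Int) lengths pattern sl),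
           pvBatch pattern (v : Int) lengths.length q) := by
  induction v with
  | zero =>
    intro fuel hf acc q hq hreps
    obtain ⟨f, rfl⟩ : ∃ f, fuel = f + 1 := ⟨fuel - 1, by omega⟩
    have hnotchk : ¬ (pvChkA (lengths.length : Int) pattern q = true) := by
      rw [pvChkA_eq]
      intro hall
      obtain ⟨⟨k, hk, hgk⟩, -⟩ :=
        pvRepsC_some pattern q lengths.length 0 (by exact_mod_cast hreps)
      have h1 := (pvG_ge_one_iff pattern q k).mpr (hall k hk) 0 hgk
      omega
    show pvLoopA (lengths.length : Int) lengths pattern sl (f + 1) acc q = _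
    rw [pvLoopA, if_neg hnotchk]
    simp only [Nat.cast_zero, List.replicate_zero, List.append_nil,
      pvBatch_zero pattern lengths.length q hq]
  | succ m ih =>
    intro fuel hf acc q hq hreps
    obtain ⟨f, rfl⟩ : ∃ f, fuel = f + 1 := ⟨fuel - 1, by omega⟩
    have hreps' : pvRepsC pattern q lengths.length = some ((m : Int) + 1) := by
      rw [hreps]; congr 1
    have hchkP : ∀ k < lengths.length, pattern.getD k 0 ≤ q.getD k 0 := by
      intro k hk
      obtain ⟨-, hmin⟩ := pvRepsC_some pattern q lengths.length _ hreps'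
      rw [← pvG_ge_one_iff pattern q k]
      intro c hc
      have := hmin k hk c hc
      omega
    have hchk : pvChkA (lengths.length : Int) pattern q = true := (pvChkA_eq _ _ _).mpr hchkP
    have hlen' : lengths.length ≤ (pvSetF (fun k x => x - pattern.getD k 0) lengths.length q).length := by
      rw [pvSetF_length]; exact hq
    have hreps2 : pvRepsC pattern (pvSetF (fun k x => x - pattern.getD k 0) lengths.length q) lengths.length
        = some (m : Int) := by
      rw [pvRepsC_sub pattern q lengths.length hq hchkP, hreps']
      simp
    show pvLoopA (lengths.length : Int) lengths pattern sl (f + 1) acc q = _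
    rw [pvLoopA, if_pos hchk, pvSubA_eq, ih f (by omega) _ _ hlen' hreps2]
    rw [show ((m + 1 : Nat) : Int) = (m : Int) + 1 from by push_cast; ring]
    rw [pvBatch_succ pattern m lengths.length q hq]
    simp [List.replicate_succ]

-- A's per-pattern loop (with the supplied fuel) equals B's per-pattern batch step
theorem pvStep_eq (lengths : List Int) (pat : List Int × Int × Int)
    (acc : List (List Int × Int × Int)) (q : List Int)
    (hq : lengths.length ≤ q.length)
    (hp : ∃ x ∈ pat.1.take lengths.length, 0 < x) :
    pvLoopA (lengths.length : Int) lengths pat.1 pat.2.1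
        (q.foldl (fun a x => a + x.natAbs) 0 + 1) acc q
      = (if 0 < (pvRepsB pat.1 q (PySem.List.pyRange 0 (lengths.length : Int) 1) none).getD 0 then
           (acc ++ List.replicate ((pvRepsB pat.1 q (PySem.List.pyRange 0 (lengths.length : Int) 1) none).getD 0).toNat
               (pat.1, pat.2.1, pvWaste (lengths.length : Int) lengths pat.1 pat.2.1),
            pvSubB (lengths.length : Int) pat.1 ((pvRepsB pat.1 q (PySem.List.pyRange 0 (lengths.length : Int) 1) none).getD 0) q)
         else (acc, q)) := by
  obtain ⟨x, hxmem, hxpos⟩ := hp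
  obtain ⟨i, hi, hxi⟩ := List.mem_iff_getElem.mp hxmem
  have hilen : i < lengths.length := by
    have := hi; rw [List.length_take] at this; omega
  have hip : i < pat.1.length := by
    have := hi; rw [List.length_take] at this; omega
  have hpi : 0 < pat.1.getD i 0 := by
    rw [List.getD_eq_getElem pat.1 0 hip]
    rw [List.getElem_take] at hxi
    omega
  have hgi : pvG pat.1 q i = some (max 0 ((q.getD i 0).fdiv (pat.1.getD i 0))) := by
    unfold pvG; rw [if_pos hpi]
  cases hv : pvRepsC pat.1 q lengths.length with
  | none => exact absurd ((pvRepsC_none _ _ _).mp hv i hilen) (by simp [hgi])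
  | some v0 =>
    obtain ⟨⟨k0, hk0, hgk0⟩, hmin⟩ := pvRepsC_some _ _ _ _ hv
    have hv0 : 0 ≤ v0 := pvG_nonneg _ _ _ _ hgk0
    have hqi : i < q.length := by omega
    -- v0 is bounded by |q[i]|, hence by the fuel the port supplies
    have hble : max 0 ((q.getD i 0).fdiv (pat.1.getD i 0)) ≤ ((q.getD i 0).natAbs : Int) := by
      rcases le_or_gt ((q.getD i 0).fdiv (pat.1.getD i 0)) 0 with h | h
      · have : (0 : Int) ≤ ((q.getD i 0).natAbs : Int) := by positivity
        omega
      · have hqpos : pat.1.getD i 0 ≤ q.getD i 0 := (pvFdiv_one_le _ _ hpi).mp h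
        have h2 : (q.getD i 0).fdiv (pat.1.getD i 0) ≤ q.getD i 0 := by
          rw [pvFdiv_pos_eq _ _ hpi]
          exact Int.ediv_le_self _ (by omega)
        have h3 := Int.le_natAbs (a := q.getD i 0)
        omega
    have hfold : q.foldl (fun a x => a + x.natAbs) 0 = (q.map Int.natAbs).sum := by
      rw [List.sum_eq_foldl, List.foldl_map]
    have hmem : (q.getD i 0).natAbs ∈ q.map Int.natAbs := by
      refine List.mem_map_of_mem ?_
      rw [List.getD_eq_getElem q 0 hqi]
      exact List.getElem_mem hqi
    have habs : ((q.getD i 0).natAbs : Int) ≤ ((q.foldl (fun a x => a + x.natAbs) 0 : Nat) : Int) := by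
      rw [hfold]
      exact_mod_cast List.le_sum_of_mem hmem
    have hbound : v0 ≤ ((q.foldl (fun a x => a + x.natAbs) 0 : Nat) : Int) := by
      have := hmin i hilen _ hgi
      omega
    have hvv : ((v0.toNat : Nat) : Int) = v0 := Int.toNat_of_nonneg hv0
    rw [pvLoopA_eq lengths pat.1 pat.2.1 v0.toNat (q.foldl (fun a x => a + x.natAbs) 0 + 1)
      (by omega) acc q hq (by rw [hvv]; exact hv)]
    rw [pvRepsB_eq, hv]
    simp only [Option.getD_some]
    by_cases h0 : 0 < v0
    · rw [if_pos h0, pvSubB_eq, pvBatch, hvv]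
    · have hz : v0 = 0 := by omega
      subst hz
      rw [if_neg h0]
      simp [pvBatch_zero pat.1 lengths.length q hq]

-- the whole fold over sorted_patterns
theorem pvFold_eq (lengths : List Int) (pats : List (List Int × Int × Int)) :
    ∀ (acc : List (List Int × Int × Int)) (q : List Int), lengths.length ≤ q.length →
      (∀ pat ∈ pats, ∃ x ∈ pat.1.take lengths.length, 0 < x) →
      pats.foldl (fun st pat => pvLoopA (lengths.length : Int) lengths pat.1 pat.2.1
          (st.2.foldl (fun a x => a + x.natAbs) 0 + 1) st.1 st.2) (acc, q)
        = pats.foldl (fun st pat =>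
            if 0 < (pvRepsB pat.1 st.2 (PySem.List.pyRange 0 (lengths.length : Int) 1) none).getD 0 then
              (st.1 ++ List.replicate ((pvRepsB pat.1 st.2 (PySem.List.pyRange 0 (lengths.length : Int) 1) none).getD 0).toNat
                  (pat.1, pat.2.1, pvWaste (lengths.length : Int) lengths pat.1 pat.2.1),
               pvSubB (lengths.length : Int) pat.1 ((pvRepsB pat.1 st.2 (PySem.List.pyRange 0 (lengths.length : Int) 1) none).getD 0) st.2)
            else st) (acc, q) := by
  induction pats with
  | nil => intro acc q _ _; rfl
  | cons pat rest ih =>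
    intro acc q hq hall
    simp only [List.foldl_cons]
    rw [pvStep_eq lengths pat acc q hq (hall pat List.mem_cons_self)]
    rcases lt_or_ge 0 ((pvRepsB pat.1 q (PySem.List.pyRange 0 (lengths.length : Int) 1) none).getD 0) with h0 | h0
    · rw [if_pos h0]
      exact ih _ _ (by rw [pvSubB_eq, pvSetF_length]; exact hq)
        (fun p hp => hall p (List.mem_cons_of_mem _ hp))
    · rw [if_neg (not_lt.mpr h0)]
      exact ih acc q hq (fun p hp => hall p (List.mem_cons_of_mem _ hp))

-- under pvFF a pattern's first check fails in range: A's check is false …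
theorem pvFF_chk (lengths quantities : List Int) (pat : List Int × Int × Int)
    (hff : pvFF lengths quantities pat) :
    ¬ (pvChkA (lengths.length : Int) pat.1 quantities = true) := by
  obtain ⟨i, hi, hiq, hip, hlt, -⟩ := hff
  rw [pvChkA_eq]
  intro hall
  have := hall i hi
  omega

-- … and B's repetition count is zero
theorem pvFF_reps (lengths quantities : List Int) (pat : List Int × Int × Int)
    (hff : pvFF lengths quantities pat) :
    (pvRepsC pat.1 quantities lengths.length).getD 0 = 0 := by
  obtain ⟨i, hi, hiq, hip, hlt, -⟩ := hff
  have hgi : pvG pat.1 quantities i = some 0 := by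
    unfold pvG
    by_cases h1 : 0 < pat.1.getD i 0
    · rw [if_pos h1]
      have hnf : ¬ (1 ≤ (quantities.getD i 0).fdiv (pat.1.getD i 0)) := by
        rw [pvFdiv_one_le _ _ h1]; omega
      have hm : max 0 ((quantities.getD i 0).fdiv (pat.1.getD i 0)) = 0 := by omega
      rw [hm]
    · rw [if_neg h1, if_pos hlt]
  cases hv : pvRepsC pat.1 quantities lengths.length with
  | none => rfl
  | some v =>
    obtain ⟨⟨k, hk, hgk⟩, hmin⟩ := pvRepsC_some _ _ _ _ hv
    have h1 := pvG_nonneg _ _ _ _ hgk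
    have h2 := hmin i hi 0 hgi
    simp only [Option.getD_some]
    omega

-- under pvFF for every pattern, both folds leave the state unchanged
theorem pvFoldFF (lengths quantities : List Int) (pats : List (List Int × Int × Int))
    (hall : ∀ pat ∈ pats, pvFF lengths quantities pat) (acc : List (List Int × Int × Int)) :
    pats.foldl (fun st pat => pvLoopA (lengths.length : Int) lengths pat.1 pat.2.1
        (st.2.foldl (fun a x => a + x.natAbs) 0 + 1) st.1 st.2) (acc, quantities)
      = (acc, quantities) ∧
    pats.foldl (fun st pat =>
        if 0 < (pvRepsB pat.1 st.2 (PySem.List.pyRange 0 (lengths.length : Int) 1) none).getD 0 then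
          (st.1 ++ List.replicate ((pvRepsB pat.1 st.2 (PySem.List.pyRange 0 (lengths.length : Int) 1) none).getD 0).toNat
              (pat.1, pat.2.1, pvWaste (lengths.length : Int) lengths pat.1 pat.2.1),
           pvSubB (lengths.length : Int) pat.1 ((pvRepsB pat.1 st.2 (PySem.List.pyRange 0 (lengths.length : Int) 1) none).getD 0) st.2)
        else st) (acc, quantities)
      = (acc, quantities) := by
  induction pats with
  | nil => exact ⟨rfl, rfl⟩
  | cons pat rest ih =>
    have hff := hall pat List.mem_cons_self
    have hrest := fun p hp => hall p (List.mem_cons_of_mem _ hp)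
    constructor
    · rw [List.foldl_cons]
      have hstep : pvLoopA (lengths.length : Int) lengths pat.1 pat.2.1
          (quantities.foldl (fun a x => a + x.natAbs) 0 + 1) acc quantities
          = (acc, quantities) := by
        rw [pvLoopA, if_neg (pvFF_chk lengths quantities pat hff)]
      rw [hstep]
      exact (ih hrest).1
    · rw [List.foldl_cons]
      have hr : (pvRepsB pat.1 quantities (PySem.List.pyRange 0 (lengths.length : Int) 1) none).getD 0 = 0 := by
        rw [pvRepsB_eq]
        exact pvFF_reps lengths quantities pat hff
      rw [hr, if_neg (by omega : ¬ (0:Int) < 0)]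
      exact (ih hrest).2

theorem cut_materials_spec : Claim_equal_cut_materials := by
  intro lengths quantities pats _hdom hpre
  show cut_materials lengths quantities pats = cut_materials_alt lengths quantities pats
  unfold cut_materials cut_materials_alt
  rcases hpre with ⟨hq, hpats⟩ | haff
  · exact pvFold_eq lengths pats [] quantities hq (fun pat hp => (hpats pat hp).2)
  · exact ((pvFoldFF lengths quantities pats haff []).1).trans
      ((pvFoldFF lengths quantities pats haff []).2).symm
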